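-- pv_equiv track=rewrite | github.com/HeroZ-Dodge/a-share-convertible-bond-skill | monitor_entry_signals.py | find_trading_day
-- ===== SOURCE A (Python) =====
-- def find_trading_day(prices: dict, base_date: str, offset: int) -> str:
--     """查找偏移后的交易日"""
--     sorted_dates = sorted(prices.keys())
--     base_idx = None
--     for i, d in enumerate(sorted_dates):
--         if d >= base_date:
--             base_idx = i
--             break
--
--     if base_idx is None:
--         return None
--
--     target_idx = base_idx + offset
--     if 0 <= target_idx < len(sorted_dates):
--         return sorted_dates[target_idx]
--     return None
-- ===== SOURCE B (Python) =====
-- def find_trading_day(prices: dict, base_date: str, offset: int) -> str: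
--     """查找偏移后的交易日 (binary search instead of linear scan)"""
--     sorted_dates = sorted(prices.keys())
--     lo, hi = 0, len(sorted_dates)
--     while lo < hi:
--         mid = (lo + hi) // 2
--         if sorted_dates[mid] < base_date:
--             lo = mid + 1
--         else:
--             hi = mid
--     if lo == len(sorted_dates):
--         return None
--     target_idx = lo + offset
--     if 0 <= target_idx < len(sorted_dates):
--         return sorted_dates[target_idx]
--     return None
-- ===== Notes on version B (the rewrite author's own statement) =====
-- stated objective: alternative
-- what changed: The linear enumerate scan for the first date >= base_date is replaced by a hand-written bisect_left binary search on the sorted date list.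
import Mathlib
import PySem

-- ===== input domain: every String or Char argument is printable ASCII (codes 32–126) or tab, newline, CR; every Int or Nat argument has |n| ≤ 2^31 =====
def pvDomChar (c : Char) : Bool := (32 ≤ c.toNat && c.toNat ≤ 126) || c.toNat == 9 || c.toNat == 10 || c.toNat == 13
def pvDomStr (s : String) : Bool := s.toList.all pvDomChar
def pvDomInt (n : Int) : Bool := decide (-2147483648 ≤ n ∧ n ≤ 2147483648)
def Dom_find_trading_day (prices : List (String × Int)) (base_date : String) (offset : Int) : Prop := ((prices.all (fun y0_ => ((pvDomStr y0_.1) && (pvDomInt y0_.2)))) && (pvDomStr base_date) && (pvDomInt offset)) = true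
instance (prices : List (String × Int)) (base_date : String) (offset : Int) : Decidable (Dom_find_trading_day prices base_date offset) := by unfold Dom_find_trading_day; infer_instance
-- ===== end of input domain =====

-- B replaces A's linear enumerate scan for the first date >= base_date with a binary search; alternative algorithm, same results.

-- ===== PORT A =====
-- the `for i, d in enumerate(sorted_dates): if d >= base_date: base_idx = i; break` loop
def ftdScanA (l : List String) (base_date : String) (i : Int) : Option Int :=
  match l with
  | [] => none
  | d :: rest => if base_date ≤ d then some i else ftdScanA rest base_date (i + 1)

def find_trading_day (prices : List (String × Int)) (base_date : String) (offset : Int) : Option String :=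
  let sorted_dates := PySem.List.sorted (PySem.List.dedup (prices.map (·.1))) (fun s => s)
  match ftdScanA sorted_dates base_date 0 with
  | none => none
  | some base_idx =>
    let target_idx := base_idx + offset
    if 0 ≤ target_idx ∧ target_idx < (sorted_dates.length : Int) then
      PySem.List.pyGet? sorted_dates target_idx
    else none

-- ===== PORT B =====
-- the `while lo < hi` binary-search loop of Source B
def ftdBisect (xs : List String) (x : String) (lo hi : Nat) : Nat :=
  if _h : lo < hi then
    let mid := (lo + hi) / 2
    if xs.getD mid "" < x then ftdBisect xs x (mid + 1) hi else ftdBisect xs x lo mid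
  else lo
termination_by hi - lo
decreasing_by all_goals omega

def find_trading_day_alt (prices : List (String × Int)) (base_date : String) (offset : Int) : Option String :=
  let sorted_dates := PySem.List.sorted (PySem.List.dedup (prices.map (·.1))) (fun s => s)
  let lo := ftdBisect sorted_dates base_date 0 sorted_dates.length
  if lo = sorted_dates.length then none
  else
    let target_idx := (lo : Int) + offset
    if 0 ≤ target_idx ∧ target_idx < (sorted_dates.length : Int) then
      PySem.List.pyGet? sorted_dates target_idx
    else none

-- ===== PRECONDITION & SPEC =====
def Spec_find_trading_day (prices : List (String × Int)) (base_date : String) (offset : Int) (out : Option String) : Prop := out = find_trading_day_alt prices base_date offset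
instance (prices : List (String × Int)) (base_date : String) (offset : Int) (out : Option String) : Decidable (Spec_find_trading_day prices base_date offset out) := by unfold Spec_find_trading_day; infer_instance

-- ===== CLAIM (what is proved, stated in full; the proofs are below) =====
def Claim_equal_find_trading_day : Prop := ∀ (prices : List (String × Int)) (base_date : String) (offset : Int), Dom_find_trading_day prices base_date offset → Spec_find_trading_day prices base_date offset (find_trading_day prices base_date offset)

-- ===== LEMMAS AND PROOFS =====

-- binary-search invariant: on a sorted list, ftdBisect returns the split point r ≤ hi:
-- everything strictly below r is < x, everything from r on is ≥ x
theorem ftdBisect_spec (xs : List String) (x : String) :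
    ∀ (lo hi : Nat), List.Pairwise (· ≤ ·) xs → lo ≤ hi → hi ≤ xs.length →
    (∀ (j : Nat) (hj : j < xs.length), j < lo → xs[j] < x) →
    (∀ (j : Nat) (hj : j < xs.length), hi ≤ j → x ≤ xs[j]) →
    ftdBisect xs x lo hi ≤ hi ∧
    (∀ (j : Nat) (hj : j < xs.length), j < ftdBisect xs x lo hi → xs[j] < x) ∧
    (∀ (j : Nat) (hj : j < xs.length), ftdBisect xs x lo hi ≤ j → x ≤ xs[j]) := by
  intro lo hi
  induction lo, hi using ftdBisect.induct xs x with
  | case1 lo hi h mid hlt ih =>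
    intro hp hlohi hhi hbelow habove
    have hmid : mid < xs.length := by omega
    have hlt' : xs[mid] < x := by rwa [List.getD_eq_getElem xs "" hmid] at hlt
    have hstep : ftdBisect xs x lo hi = ftdBisect xs x (mid + 1) hi := by
      conv_lhs => rw [ftdBisect]
      simp only [dif_pos h]
      rw [if_pos (show xs.getD ((lo + hi) / 2) "" < x from hlt)]
    have hrec := ih hp (by omega) hhi
      (by
        intro j hj hjlt
        calc xs[j] ≤ xs[mid] := by
              rcases Nat.eq_or_lt_of_le (by omega : j ≤ mid) with rfl | hlt2
              · exact le_refl _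
              · exact (List.pairwise_iff_getElem.mp hp) j mid hj hmid hlt2
             _ < x := hlt')
      habove
    rw [hstep]
    exact ⟨hrec.1, hrec.2.1, hrec.2.2⟩
  | case2 lo hi h mid hlt ih =>
    intro hp hlohi hhi hbelow habove
    have hmid : mid < xs.length := by omega
    have hxmid : x ≤ xs[mid] := by
      rw [List.getD_eq_getElem xs "" hmid] at hlt
      exact le_of_not_gt hlt
    have hstep : ftdBisect xs x lo hi = ftdBisect xs x lo mid := by
      conv_lhs => rw [ftdBisect]
      simp only [dif_pos h]
      rw [if_neg (show ¬ xs.getD ((lo + hi) / 2) "" < x from hlt)]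
    have hrec := ih hp (by omega) (by omega) hbelow
      (by
        intro j hj hjge
        calc x ≤ xs[mid] := hxmid
             _ ≤ xs[j] := by
              rcases Nat.eq_or_lt_of_le hjge with rfl | hlt2
              · exact le_refl _
              · exact (List.pairwise_iff_getElem.mp hp) mid j hmid hj hlt2)
    rw [hstep]
    exact ⟨by omega, hrec.2.1, hrec.2.2⟩
  | case3 lo hi h =>
    intro hp hlohi hhi hbelow habove
    have hstep : ftdBisect xs x lo hi = lo := by
      rw [ftdBisect]; simp only [dif_neg h]
    rw [hstep]
    exact ⟨hlohi, fun j hj hjlt => hbelow j hj hjlt,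
           fun j hj hjge => habove j hj (by omega)⟩

-- the linear scan, characterised by the same split point
theorem ftdScanA_char (x : String) :
    ∀ (l : List String) (i : Int) (r : Nat), r ≤ l.length →
    (∀ (j : Nat) (hj : j < l.length), j < r → l[j] < x) →
    (∀ (j : Nat) (hj : j < l.length), r ≤ j → x ≤ l[j]) →
    ftdScanA l x i = if r = l.length then none else some (i + r) := by
  intro l
  induction l with
  | nil => intro i r hr _ _; simp at hr; simp [ftdScanA, hr]
  | cons d rest ih =>
    intro i r hr hbelow habove
    match r with
    | 0 =>
      have hd : x ≤ d := habove 0 (by simp) (by omega)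
      simp [ftdScanA, hd]
    | r' + 1 =>
      have hd : d < x := hbelow 0 (by simp) (by omega)
      have hrec := ih (i + 1) r' (by simpa using hr)
        (fun j hj hjlt => by simpa using hbelow (j + 1) (by simpa using hj) (by omega))
        (fun j hj hjge => by simpa using habove (j + 1) (by simpa using hj) (by omega))
      rw [ftdScanA]
      rw [if_neg (not_le.mpr hd)]
      rw [hrec]
      by_cases hcase : r' = rest.length
      · simp [hcase]
      · have hne : ¬ (r' + 1 = (d :: rest).length) := by simp; omega
        rw [if_neg hcase, if_neg hne]
        congr 1
        push_cast
        omega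

-- the two full programs agree, stated over the shared sorted date list
theorem ftd_eq (sd : List String) (x : String) (offset : Int)
    (hp : List.Pairwise (· ≤ ·) sd) :
    (match ftdScanA sd x 0 with
     | none => none
     | some b =>
       if 0 ≤ b + offset ∧ b + offset < (sd.length : Int) then PySem.List.pyGet? sd (b + offset)
       else none)
    = (if ftdBisect sd x 0 sd.length = sd.length then none
       else
         if 0 ≤ (ftdBisect sd x 0 sd.length : Int) + offset ∧
            (ftdBisect sd x 0 sd.length : Int) + offset < (sd.length : Int) then
           PySem.List.pyGet? sd ((ftdBisect sd x 0 sd.length : Int) + offset)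
         else none) := by
  obtain ⟨hle, hbelow, habove⟩ := ftdBisect_spec sd x 0 sd.length hp (Nat.zero_le _) (le_refl _)
    (fun j hj hjlt => absurd hjlt (by omega))
    (fun j hj hjge => absurd hj (by omega))
  set r := ftdBisect sd x 0 sd.length with hr
  rw [ftdScanA_char x sd 0 r hle hbelow habove]
  by_cases hc : r = sd.length
  · simp [hc]
  · rw [if_neg hc, if_neg hc]
    have : (0 : Int) + (r : Int) = (r : Int) := by omega
    rw [this]

-- ===== VERDICT (by name: the statement is the Claim_ definition above) =====
theorem find_trading_day_spec : Claim_equal_find_trading_day := by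
  intro prices base_date offset _
  unfold Spec_find_trading_day
  have hp : List.Pairwise (· ≤ ·)
      (PySem.List.sorted (PySem.List.dedup (prices.map (·.1))) (fun s => s)) := by
    simpa using PySem.List.sorted_pairwise (PySem.List.dedup (prices.map (·.1))) (fun s => s)
  exact ftd_eq _ base_date offset hp
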